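/- GENERATED by farm/mkstatement.py from design/units.tsv (unit `DGifGetImageHeader.E`) and the assertions of Gif/Spec/Seg_DGifGetImageHeader.lean — do not edit.
   THE STATEMENT of the proof unit `DGifGetImageHeader.E`: segment E of `DGifGetImageHeader` (10 instructions; entries 0x108e78;
   exits ret; ranges 0x108e78-0x108e95)
   takes each of its entry assertions to one of its exit assertions (`Gif.Spec.DGifGetImageHeader.SegE`), given the contracts of its callees.
   What the names mean: ProgX/Base/Spec/Basic.lean (the shared hypotheses), Gif/Spec/Seg_DGifGetImageHeader.lean (the assertions). The theorem to prove:
   `theorem DGifGetImageHeader_E_ok : Gif.Spec.DGifGetImageHeader_E.Statement`. -/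
import Gif.Code
import Gif.Dec.All
import Gif.Labels
import Gif.Spec.Seg_DGifGetImageHeader
namespace Gif.Spec.DGifGetImageHeader_E
open X86 X86.User Asan

/-- The statement of unit `DGifGetImageHeader.E`. -/
def Statement : Prop :=
  ∀ (Lay : Layout) (_hLay : Lay.hi = 0x1000000) (μ : Microarch) (_hμ : UserX.MicroOK μ) (u₀ : State)
    (_hcode : HasCodeNat Lay u₀ Gif.L.DGifGetImageHeader.entry Gif.Code.code_DGifGetImageHeader.nat Gif.L.DGifGetImageHeader.size),
    Gif.Spec.DGifGetImageHeader.SegE Lay μ u₀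

end Gif.Spec.DGifGetImageHeader_E
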